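-- pv_equiv track=rewrite | github.com/SainathReddy5/Pyscripts | raji.py | checkl
-- ===== SOURCE A (Python) =====
-- def apply(l):
--     nl = []
--     for i in l:
--         if i > 0:
--             nl.append(i - 1)
--         else:
--             nl.append(i)
--     return nl
--
-- def checkl(l):
--     s = l[0]
--     l = l[1:]
--     s1 = l.count(1)
--     s2 = l.count(2)
--     s3 = l.count(3)
--     s4 = l.count(4)
--     s5 = l.count(5)
--     s6 = l.count(6)
--
--     l = [s1,s2,s3,s4,s5,s6]
--
--     while (l.count(0) < 3 ):
--         if l.count(0) == 0:
--             l = apply(l)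
--             s = s + 4
--         if l.count(0) == 1:
--             l = apply(l)
--             s = s + 2
--         if l.count(0) == 2:
--             l = apply(l)
--             s = s + 1
--     return s
-- ===== SOURCE B (Python) =====
-- def checkl(l):
--     s = l[0]
--     counts = [l[1:].count(k) for k in (1, 2, 3, 4, 5, 6)]
--     a1, a2, a3 = sorted(counts)[:3]
--     return s + 2 * a1 + a2 + a3
-- ===== Notes on version B (the rewrite author's own statement) =====
-- stated objective: simpler
-- what changed: Replaces the decrement-and-accumulate while loop over the six counts by a closed form: sort the six counts of the values 1..6 in the tail of the list and return the first element plus 2*a1 + a2 + a3, where a1,a2,a3 are the three smallest counts.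
import Mathlib
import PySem

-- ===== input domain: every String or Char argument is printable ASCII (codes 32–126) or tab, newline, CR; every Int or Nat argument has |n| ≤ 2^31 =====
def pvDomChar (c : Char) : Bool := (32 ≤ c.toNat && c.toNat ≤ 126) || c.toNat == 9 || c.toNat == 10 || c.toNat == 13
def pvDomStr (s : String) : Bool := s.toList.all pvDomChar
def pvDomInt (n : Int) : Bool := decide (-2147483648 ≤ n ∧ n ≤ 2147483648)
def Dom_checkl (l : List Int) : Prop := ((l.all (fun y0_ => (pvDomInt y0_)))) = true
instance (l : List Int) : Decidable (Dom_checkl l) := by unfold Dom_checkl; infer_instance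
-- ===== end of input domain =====

-- B replaces A's decrement-and-accumulate while loop by the closed form: first element plus
-- 2*a1 + a2 + a3 over the three smallest of the six counts (objective: simpler).

-- ===== PORT A =====

-- Python `apply(l)`: the append loop builds exactly the elementwise map below.
-- The counts A loops over are nonnegative, so the loop state is carried as List Nat.
def pyDec (i : Nat) : Nat := if i > 0 then i - 1 else i

def pyApply (l : List Nat) : List Nat := l.map pyDec

-- One branch of A's loop body: `if <count(0) = c>: l = apply(l); s = s + inc`.
def stage (c : Nat) (inc : Int) (p : List Nat × Int) : List Nat × Int :=
  if p.1.count 0 = c then (pyApply p.1, p.2 + inc) else p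

-- One pass of the body of A's while loop (the three non-elif `if` branches, in order).
def bodyA (st : List Nat × Int) : List Nat × Int := stage 2 1 (stage 1 2 (stage 0 4 st))

theorem pyApply_sum_le (l : List Nat) : (pyApply l).sum ≤ l.sum := by
  induction l with
  | nil => simp [pyApply]
  | cons x t ih =>
    have hdx : pyDec x ≤ x := by unfold pyDec; split <;> omega
    simp only [pyApply, List.map_cons, List.sum_cons] at *
    omega

theorem pyApply_sum_lt (l : List Nat) (h : 0 < l.sum) : (pyApply l).sum < l.sum := by
  induction l with
  | nil => simp at h
  | cons x t ih =>
    have hle : (pyApply t).sum ≤ t.sum := pyApply_sum_le t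
    by_cases hx : 0 < x
    · have hdx : pyDec x < x := by unfold pyDec; rw [if_pos hx]; omega
      simp only [pyApply, List.map_cons, List.sum_cons] at hle ⊢
      omega
    · have hdx : pyDec x ≤ x := by unfold pyDec; split <;> omega
      have hts : 0 < t.sum := by simp only [List.sum_cons] at h; omega
      have hst := ih hts
      simp only [pyApply, List.map_cons, List.sum_cons] at hle hst ⊢
      omega

theorem stage_fire (c : Nat) (inc : Int) (p : List Nat × Int) (h : p.1.count 0 = c) :
    stage c inc p = (pyApply p.1, p.2 + inc) := by unfold stage; rw [if_pos h]

theorem stage_skip (c : Nat) (inc : Int) (p : List Nat × Int) (h : p.1.count 0 ≠ c) :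
    stage c inc p = p := by unfold stage; rw [if_neg h]

theorem stage_sum_le (c : Nat) (inc : Int) (p : List Nat × Int) :
    (stage c inc p).1.sum ≤ p.1.sum := by
  unfold stage; split
  · exact pyApply_sum_le _
  · exact le_refl _

theorem bodyA_sum_lt (l : List Nat) (s : Int) (hc : l.count 0 < 3) (h : 0 < l.sum) :
    (bodyA (l, s)).1.sum < l.sum := by
  unfold bodyA
  have hc3 : l.count 0 = 0 ∨ l.count 0 = 1 ∨ l.count 0 = 2 := by omega
  rcases hc3 with h0 | h0 | h0
  · rw [stage_fire 0 4 (l, s) h0]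
    calc (stage 2 1 (stage 1 2 (pyApply l, s + 4))).1.sum
        ≤ (stage 1 2 (pyApply l, s + 4)).1.sum := stage_sum_le ..
      _ ≤ (pyApply l).sum := stage_sum_le ..
      _ < l.sum := pyApply_sum_lt l h
  · rw [stage_skip 0 4 (l, s) (by simp [h0]), stage_fire 1 2 (l, s) h0]
    calc (stage 2 1 (pyApply l, s + 2)).1.sum
        ≤ (pyApply l).sum := stage_sum_le ..
      _ < l.sum := pyApply_sum_lt l h
  · rw [stage_skip 0 4 (l, s) (by simp [h0]), stage_skip 1 2 (l, s) (by simp [h0]),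
        stage_fire 2 1 (l, s) h0]
    exact pyApply_sum_lt l h

-- A's while loop.  The conjunct `0 < l.sum` only makes the recursion total: at every state
-- this loop is actually run on (six nonnegative counts with fewer than three zeros) it is true.
def loopA (l : List Nat) (s : Int) : Int :=
  if h : l.count 0 < 3 ∧ 0 < l.sum then
    loopA (bodyA (l, s)).1 (bodyA (l, s)).2
  else s
termination_by l.sum
decreasing_by exact bodyA_sum_lt l s h.1 h.2

def checkl (l : List Int) : Int :=
  let s := (PySem.List.pyGet? l 0).getD 0        -- first element; IndexError on the empty list is excluded by Pre_
  let t := PySem.List.slice l (some 1) none      -- l[1:]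
  let s1 := PySem.List.count t 1
  let s2 := PySem.List.count t 2
  let s3 := PySem.List.count t 3
  let s4 := PySem.List.count t 4
  let s5 := PySem.List.count t 5
  let s6 := PySem.List.count t 6
  loopA [s1, s2, s3, s4, s5, s6] s

-- ===== PORT B =====
def checkl_alt (l : List Int) : Int :=
  let s := (PySem.List.pyGet? l 0).getD 0        -- first element; IndexError on the empty list is excluded by Pre_
  let counts := [1, 2, 3, 4, 5, 6].map (fun k => PySem.List.count (PySem.List.slice l (some 1) none) k)
  match PySem.List.slice (PySem.List.sorted counts (fun x => x) false) none (some 3) with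
  | [a1, a2, a3] => s + 2 * (a1 : Int) + (a2 : Int) + (a3 : Int)
  | _ => s                                       -- unreachable: sorted(counts)[:3] has three elements

-- ===== PRECONDITION & SPEC =====
-- Pre_ excludes only the empty list, on which A (and B) raise IndexError at the first-element access.
def Pre_checkl (l : List Int) : Prop := l ≠ []
instance (l : List Int) : Decidable (Pre_checkl l) := by unfold Pre_checkl; infer_instance
def pvWitness_checkl : List Int := [7, 1, 1, 2, 2, 2, 5, 3]

def Spec_checkl (l : List Int) (out : Int) : Prop := out = checkl_alt l
instance (l : List Int) (out : Int) : Decidable (Spec_checkl l out) := by unfold Spec_checkl; infer_instance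

-- ===== CLAIM (what is proved, stated in full; the proofs are below) =====
def Claim_equal_checkl : Prop := ∀ (l : List Int), Dom_checkl l → Pre_checkl l → Spec_checkl l (checkl l)

-- ===== LEMMAS AND PROOFS =====

-- Proof-side single-step loop: one decrement pass per iteration, scoring 4/2/1 by the
-- number of zeros; A's cascaded body is absorbed into repeated single steps below.
def loopS (l : List Nat) (s : Int) : Int :=
  if h : l.count 0 < 3 ∧ 0 < l.sum then
    loopS (pyApply l) (s + (if l.count 0 = 0 then 4 else if l.count 0 = 1 then 2 else 1))
  else s
termination_by l.sum
decreasing_by exact pyApply_sum_lt l h.2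

theorem sum_pos_of_count_zero_lt (l : List Nat) (h : l.count 0 < l.length) : 0 < l.sum := by
  rcases Nat.eq_zero_or_pos l.sum with h0 | h0
  · exfalso
    have hall := List.sum_eq_zero_iff_forall_eq_nat.mp h0
    have : l.count 0 = l.length := List.count_eq_length.mpr (fun x hx => (hall x hx).symm)
    omega
  · exact h0

theorem loopS_fire (l : List Nat) (s : Int) (h6 : l.length = 6) (hc : l.count 0 < 3) :
    loopS l s = loopS (pyApply l) (s + (if l.count 0 = 0 then 4 else if l.count 0 = 1 then 2 else 1)) := by
  rw [loopS, dif_pos ⟨hc, sum_pos_of_count_zero_lt l (by omega)⟩]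

theorem pyApply_length (l : List Nat) : (pyApply l).length = l.length := by
  simp [pyApply]

theorem stage_length (c : Nat) (inc : Int) (p : List Nat × Int) :
    (stage c inc p).1.length = p.1.length := by
  unfold stage; split
  · simp [pyApply]
  · rfl

theorem bodyA_length (l : List Nat) (s : Int) : (bodyA (l, s)).1.length = l.length := by
  unfold bodyA
  rw [stage_length, stage_length, stage_length]

theorem absorb_step (l : List Nat) (s : Int) (h6 : l.length = 6) (hc : l.count 0 < 3) :
    loopS (bodyA (l, s)).1 (bodyA (l, s)).2 = loopS l s := by
  unfold bodyA
  have hc3 : l.count 0 = 0 ∨ l.count 0 = 1 ∨ l.count 0 = 2 := by omega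
  have h6' : (pyApply l).length = 6 := by rw [pyApply_length]; exact h6
  have h6'' : (pyApply (pyApply l)).length = 6 := by rw [pyApply_length]; exact h6'
  rcases hc3 with h0 | h0 | h0
  · rw [stage_fire 0 4 (l, s) h0]
    have e0 : loopS l s = loopS (pyApply l) (s + 4) := by
      rw [loopS_fire l s h6 hc, h0]; norm_num
    by_cases h1 : (pyApply l).count 0 = 1
    · rw [stage_fire 1 2 (pyApply l, s + 4) h1]
      have e1 : loopS (pyApply l) (s + 4) = loopS (pyApply (pyApply l)) (s + 4 + 2) := by
        rw [loopS_fire (pyApply l) (s + 4) h6' (by omega), h1]; norm_num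
      by_cases h2 : (pyApply (pyApply l)).count 0 = 2
      · rw [stage_fire 2 1 (pyApply (pyApply l), s + 4 + 2) h2, e0, e1,
           loopS_fire (pyApply (pyApply l)) (s + 4 + 2) h6'' (by omega), h2]
        norm_num
      · rw [stage_skip 2 1 (pyApply (pyApply l), s + 4 + 2) h2, e0, e1]
    · rw [stage_skip 1 2 (pyApply l, s + 4) h1]
      by_cases h2 : (pyApply l).count 0 = 2
      · rw [stage_fire 2 1 (pyApply l, s + 4) h2, e0,
           loopS_fire (pyApply l) (s + 4) h6' (by omega), h2]
        norm_num
      · rw [stage_skip 2 1 (pyApply l, s + 4) h2, e0]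
  · rw [stage_skip 0 4 (l, s) (by simp [h0]), stage_fire 1 2 (l, s) h0]
    have e0 : loopS l s = loopS (pyApply l) (s + 2) := by
      rw [loopS_fire l s h6 hc, h0]; norm_num
    by_cases h2 : (pyApply l).count 0 = 2
    · rw [stage_fire 2 1 (pyApply l, s + 2) h2, e0,
         loopS_fire (pyApply l) (s + 2) h6' (by omega), h2]
      norm_num
    · rw [stage_skip 2 1 (pyApply l, s + 2) h2, e0]
  · rw [stage_skip 0 4 (l, s) (by simp [h0]), stage_skip 1 2 (l, s) (by simp [h0]),
       stage_fire 2 1 (l, s) h0]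
    rw [loopS_fire l s h6 hc, h0]
    norm_num

theorem loopA_eq_loopS (n : Nat) : ∀ (l : List Nat) (s : Int), l.sum = n → l.length = 6 →
    loopA l s = loopS l s := by
  induction n using Nat.strong_induction_on with
  | _ n ih =>
    intro l s hsum h6
    rw [loopA]
    by_cases hg : l.count 0 < 3 ∧ 0 < l.sum
    · rw [dif_pos hg]
      have hlt := bodyA_sum_lt l s hg.1 hg.2
      have h6' : (bodyA (l, s)).1.length = 6 := by rw [bodyA_length]; exact h6
      rw [ih ((bodyA (l, s)).1.sum) (by omega) _ _ rfl h6']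
      exact absorb_step l s h6 hg.1
    · rw [dif_neg hg, loopS, dif_neg hg]

theorem loopS_perm (n : Nat) : ∀ (l l' : List Nat) (s : Int), l.sum = n → l.Perm l' →
    loopS l s = loopS l' s := by
  induction n using Nat.strong_induction_on with
  | _ n ih =>
    intro l l' s hsum hp
    have hcount : l.count 0 = l'.count 0 := hp.count_eq 0
    have hsum' : l.sum = l'.sum := hp.sum_eq
    rw [loopS]
    conv_rhs => rw [loopS]
    by_cases hg : l.count 0 < 3 ∧ 0 < l.sum
    · rw [dif_pos hg, dif_pos (show l'.count 0 < 3 ∧ 0 < l'.sum by omega), hcount]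
      exact ih (pyApply l).sum (by have := pyApply_sum_lt l hg.2; omega) _ _ _ rfl (hp.map pyDec)
    · rw [dif_neg hg, dif_neg (show ¬(l'.count 0 < 3 ∧ 0 < l'.sum) by omega)]

theorem loopS_sorted (n : Nat) : ∀ (a1 a2 a3 a4 a5 a6 : Nat) (s : Int),
    a1 + a2 + a3 + a4 + a5 + a6 = n →
    a1 ≤ a2 → a2 ≤ a3 → a3 ≤ a4 → a4 ≤ a5 → a5 ≤ a6 →
    loopS [a1, a2, a3, a4, a5, a6] s = s + 2 * (a1 : Int) + (a2 : Int) + (a3 : Int) := by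
  induction n using Nat.strong_induction_on with
  | _ n ih =>
    intro a1 a2 a3 a4 a5 a6 s hn h12 h23 h34 h45 h56
    by_cases hz3 : a3 = 0
    · have hz1 : a1 = 0 := by omega
      have hz2 : a2 = 0 := by omega
      subst hz1 hz2 hz3
      rw [loopS, dif_neg (by
        rintro ⟨hlt, -⟩
        have : 3 ≤ List.count 0 [0, 0, 0, a4, a5, a6] := by
          simp [List.count_cons]
        omega)]
      norm_num
    · have hp3 : 0 < a3 := Nat.pos_of_ne_zero hz3
      have hp4 : 0 < a4 := by omega
      have hp5 : 0 < a5 := by omega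
      have hp6 : 0 < a6 := by omega
      have hsumpos : 0 < ([a1, a2, a3, a4, a5, a6] : List Nat).sum := by
        simp; omega
      have d3 : pyDec a3 = a3 - 1 := by unfold pyDec; rw [if_pos hp3]
      have d4 : pyDec a4 = a4 - 1 := by unfold pyDec; rw [if_pos hp4]
      have d5 : pyDec a5 = a5 - 1 := by unfold pyDec; rw [if_pos hp5]
      have d6 : pyDec a6 = a6 - 1 := by unfold pyDec; rw [if_pos hp6]
      by_cases hz1 : a1 = 0
      · have d1 : pyDec a1 = 0 := by unfold pyDec; simp [hz1]
        by_cases hz2 : a2 = 0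
        · -- two zeros: score 1
          have d2 : pyDec a2 = 0 := by unfold pyDec; simp [hz2]
          have hcnt : List.count 0 [a1, a2, a3, a4, a5, a6] = 2 := by
            subst hz1 hz2
            simp [List.count_cons]
            omega
          rw [loopS, dif_pos ⟨by omega, hsumpos⟩, hcnt]
          norm_num
          simp only [pyApply, List.map_cons, List.map_nil, d1, d2, d3, d4, d5, d6]
          rw [ih (0 + 0 + (a3 - 1) + (a4 - 1) + (a5 - 1) + (a6 - 1)) (by omega) _ _ _ _ _ _ _
              rfl (by omega) (by omega) (by omega) (by omega) (by omega)]
          push_cast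
          omega
        · -- one zero: score 2
          have hp2 : 0 < a2 := Nat.pos_of_ne_zero hz2
          have d2 : pyDec a2 = a2 - 1 := by unfold pyDec; rw [if_pos hp2]
          have hcnt : List.count 0 [a1, a2, a3, a4, a5, a6] = 1 := by
            subst hz1
            simp [List.count_cons]
            omega
          rw [loopS, dif_pos ⟨by omega, hsumpos⟩, hcnt]
          norm_num
          simp only [pyApply, List.map_cons, List.map_nil, d1, d2, d3, d4, d5, d6]
          rw [ih (0 + (a2 - 1) + (a3 - 1) + (a4 - 1) + (a5 - 1) + (a6 - 1)) (by omega) _ _ _ _ _ _ _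
              rfl (by omega) (by omega) (by omega) (by omega) (by omega)]
          push_cast
          omega
      · -- no zeros: score 4
        have hp1 : 0 < a1 := Nat.pos_of_ne_zero hz1
        have hp2 : 0 < a2 := by omega
        have d1 : pyDec a1 = a1 - 1 := by unfold pyDec; rw [if_pos hp1]
        have d2 : pyDec a2 = a2 - 1 := by unfold pyDec; rw [if_pos hp2]
        have hcnt : List.count 0 [a1, a2, a3, a4, a5, a6] = 0 := by
          simp [List.count_cons]
          omega
        rw [loopS, dif_pos ⟨by omega, hsumpos⟩, hcnt]
        norm_num
        simp only [pyApply, List.map_cons, List.map_nil, d1, d2, d3, d4, d5, d6]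
        rw [ih ((a1 - 1) + (a2 - 1) + (a3 - 1) + (a4 - 1) + (a5 - 1) + (a6 - 1)) (by omega) _ _ _ _ _ _ _
            rfl (by omega) (by omega) (by omega) (by omega) (by omega)]
        omega

-- ===== VERDICT (by name: the statement is the Claim_ definition above) =====
theorem checkl_spec : Claim_equal_checkl := by
  unfold Claim_equal_checkl
  intro l _ hpre
  unfold Spec_checkl
  cases l with
  | nil => exact absurd rfl hpre
  | cons x rest =>
    simp only [checkl, checkl_alt, PySem.List.pyGet?_zero_cons, Option.getD_some,
      PySem.List.slice_from_one, List.tail_cons, List.map_cons, List.map_nil]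
    set c1 := PySem.List.count rest 1 with hc1
    set c2 := PySem.List.count rest 2 with hc2
    set c3 := PySem.List.count rest 3 with hc3
    set c4 := PySem.List.count rest 4 with hc4
    set c5 := PySem.List.count rest 5 with hc5
    set c6 := PySem.List.count rest 6 with hc6
    have hlen : (PySem.List.sorted [c1, c2, c3, c4, c5, c6] (fun x => x) false).length = 6 := by
      rw [PySem.List.length_sorted]; rfl
    rcases hS : PySem.List.sorted [c1, c2, c3, c4, c5, c6] (fun x => x) false with
      _ | ⟨b1, _ | ⟨b2, _ | ⟨b3, _ | ⟨b4, _ | ⟨b5, _ | ⟨b6, t⟩⟩⟩⟩⟩⟩ <;>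
      rw [hS] at hlen <;> simp only [List.length_cons, List.length_nil] at hlen
    · omega
    · omega
    · omega
    · omega
    · omega
    · omega
    have ht : t = [] := by
      cases t
      · rfl
      · simp at hlen
    subst ht
    have hperm : ([c1, c2, c3, c4, c5, c6] : List Nat).Perm [b1, b2, b3, b4, b5, b6] := by
      have := PySem.List.sorted_perm (xs := [c1, c2, c3, c4, c5, c6]) (key := fun x => x) (rev := false)
      rw [hS] at this
      exact this.symm
    have hpw := PySem.List.sorted_pairwise (xs := [c1, c2, c3, c4, c5, c6]) (key := fun x => x)
    rw [hS] at hpw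
    simp only [List.pairwise_cons, List.mem_cons, List.not_mem_nil] at hpw
    rw [PySem.List.slice_to _ (by norm_num)]
    show loopA [c1, c2, c3, c4, c5, c6] x = x + 2 * (b1 : Int) + (b2 : Int) + (b3 : Int)
    rw [loopA_eq_loopS ([c1, c2, c3, c4, c5, c6] : List Nat).sum _ _ rfl rfl,
        loopS_perm ([c1, c2, c3, c4, c5, c6] : List Nat).sum _ _ _ rfl hperm,
        loopS_sorted ([b1, b2, b3, b4, b5, b6] : List Nat).sum _ _ _ _ _ _ _ (by simp only [List.sum_cons, List.sum_nil]; omega)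
          (by simp_all) (by simp_all) (by simp_all) (by simp_all) (by simp_all)]
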